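-- pv_equiv track=rewrite | github.com/nextghost/openorion2 | paldump.py | convert_palette
-- ===== SOURCE A (Python) =====
-- def convert_palette(data):
--     ret = list()
--     for idx in range(len(data) // 4):
--         r = data[4*idx+1] << 2
--         g = data[4*idx+2] << 2
--         b = data[4*idx+3] << 2
--         ret.append((r << 16) | (g << 8) | b)
--     return ret
-- ===== SOURCE B (Python) =====
-- def convert_palette(data):
--     it = iter(data)
--     return [(r << 18) | (g << 10) | (b << 2) for _, r, g, b in zip(it, it, it, it)]
-- ===== Notes on version B (the rewrite author's own statement) =====
-- stated objective: idiomatic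
-- what changed: Replaces the index-arithmetic loop (range(len//4), data[4*idx+k]) by the standard zip-of-one-iterator grouper that consumes the list in 4-byte chunks directly, packing each triple with a single pre-combined shift per channel.
import Mathlib
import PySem

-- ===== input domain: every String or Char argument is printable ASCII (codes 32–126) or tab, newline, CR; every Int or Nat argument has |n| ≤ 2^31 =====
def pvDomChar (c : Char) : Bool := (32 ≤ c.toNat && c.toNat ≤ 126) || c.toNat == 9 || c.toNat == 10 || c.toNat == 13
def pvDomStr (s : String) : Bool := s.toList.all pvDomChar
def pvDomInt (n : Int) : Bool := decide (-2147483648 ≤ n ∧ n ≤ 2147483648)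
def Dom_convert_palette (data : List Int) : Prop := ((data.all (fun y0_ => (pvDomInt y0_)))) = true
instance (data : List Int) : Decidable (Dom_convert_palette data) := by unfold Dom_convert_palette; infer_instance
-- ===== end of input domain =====

-- B: idiomatic zip-of-one-iterator grouper over 4-byte chunks instead of index arithmetic; same cost, return value only.
-- ===== PORT A =====
def convert_palette (data : List Int) : List Int :=
  (PySem.List.pyRange 0 (PySem.Int.floordiv (data.length : Int) 4) 1).foldl
    (fun ret idx =>
      let r := (PySem.List.pyGetD data (4*idx+1) 0) <<< 2
      let g := (PySem.List.pyGetD data (4*idx+2) 0) <<< 2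
      let b := (PySem.List.pyGetD data (4*idx+3) 0) <<< 2
      ret ++ [PySem.Int.bor (PySem.Int.bor (r <<< 16) (g <<< 8)) b]) []

-- ===== PORT B =====
def convert_palette_alt : List Int → List Int
  | _ :: r :: g :: b :: rest =>
      PySem.Int.bor (PySem.Int.bor (r <<< 18) (g <<< 10)) (b <<< 2) :: convert_palette_alt rest
  | _ => []

-- ===== PRECONDITION & SPEC =====
def Spec_convert_palette (data : List Int) (out : List Int) : Prop := out = convert_palette_alt data
instance (data : List Int) (out : List Int) : Decidable (Spec_convert_palette data out) := by unfold Spec_convert_palette; infer_instance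

-- ===== CLAIM (what is proved, stated in full; the proofs are below) =====
def Claim_equal_convert_palette : Prop := ∀ (data : List Int), Dom_convert_palette data → Spec_convert_palette data (convert_palette data)

-- ===== LEMMAS AND PROOFS =====

-- the packed value of chunk k, with Nat indexing (proof-side normal form of both ports' packing)
def pvPack (D : List Int) (k : Nat) : Int :=
  PySem.Int.bor (PySem.Int.bor ((D.getD (4*k+1) 0 <<< 2) <<< 16) ((D.getD (4*k+2) 0 <<< 2) <<< 8))
    (D.getD (4*k+3) 0 <<< 2)

lemma pvShift (v : Int) (a b : Nat) : (v <<< (a:Int)) <<< (b:Int) = v <<< ((a:Int) + (b:Int)) :=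
  (Int.shiftLeft_add' v a (b:Int)).symm

lemma pvA_eq_map (D : List Int) : convert_palette D = (List.range (D.length / 4)).map (pvPack D) := by
  show (PySem.List.pyRange 0 (PySem.Int.floordiv (D.length : Int) 4) 1).foldl
      (fun ret idx => ret ++ [PySem.Int.bor (PySem.Int.bor
        ((PySem.List.pyGetD D (4*idx+1) 0 <<< 2) <<< 16)
        ((PySem.List.pyGetD D (4*idx+2) 0 <<< 2) <<< 8))
        (PySem.List.pyGetD D (4*idx+3) 0 <<< 2)]) [] = _
  rw [PySem.List.foldl_append_singleton_eq_map,
      show PySem.Int.floordiv (D.length : Int) 4 = ((D.length / 4 : Nat) : Int) from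
        by exact_mod_cast PySem.Int.floordiv_natCast D.length 4,
      PySem.List.pyRange_zero_natCast, List.map_map, List.nil_append]
  refine List.map_congr_left (fun k _ => ?_)
  simp only [Function.comp_apply, pvPack,
    show 4*((k:Nat):Int)+1 = ((4*k+1 : Nat) : Int) from by push_cast; ring,
    show 4*((k:Nat):Int)+2 = ((4*k+2 : Nat) : Int) from by push_cast; ring,
    show 4*((k:Nat):Int)+3 = ((4*k+3 : Nat) : Int) from by push_cast; ring,
    PySem.List.pyGetD_natCast]

lemma pvPack_succ (x r g b : Int) (rest : List Int) (k : Nat) :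
    pvPack (x::r::g::b::rest) (k+1) = pvPack rest k := by
  unfold pvPack
  simp only [show 4*(k+1)+1 = (4*k+1)+1+1+1+1 from by ring,
    show 4*(k+1)+2 = (4*k+2)+1+1+1+1 from by ring,
    show 4*(k+1)+3 = (4*k+3)+1+1+1+1 from by ring,
    List.getD_cons_succ]

lemma pvMap_eq_alt (D : List Int) :
    (List.range (D.length / 4)).map (pvPack D) = convert_palette_alt D := by
  induction D using convert_palette_alt.induct with
  | case1 x r g b rest ih =>
    rw [show (x::r::g::b::rest).length / 4 = rest.length / 4 + 1 from by
          simp [List.length_cons]; omega,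
        List.range_succ_eq_map, List.map_cons, List.map_map, convert_palette_alt]
    have h1 : (r <<< (2:Int)) <<< (16:Int) = r <<< (18:Int) := by
      have := pvShift r 2 16; norm_num at this; exact this
    have h2 : (g <<< (2:Int)) <<< (8:Int) = g <<< (10:Int) := by
      have := pvShift g 2 8; norm_num at this; exact this
    have hh : pvPack (x::r::g::b::rest) 0 =
        PySem.Int.bor (PySem.Int.bor (r <<< (18:Int)) (g <<< (10:Int))) (b <<< (2:Int)) := by
      simp [pvPack, List.getD, h1, h2]
    have ht : List.map (pvPack (x::r::g::b::rest) ∘ Nat.succ) (List.range (rest.length/4)) =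
        convert_palette_alt rest := by
      rw [← ih]
      exact List.map_congr_left (fun k _ => pvPack_succ x r g b rest k)
    rw [hh, ht]
  | case2 D h =>
    rcases D with _|⟨a,_|⟨b,_|⟨c,_|⟨d,t⟩⟩⟩⟩ <;>
      first
        | exact (h _ _ _ _ _ rfl).elim
        | simp [convert_palette_alt]


-- ===== VERDICT (by name: the statement is the Claim_ definition above) =====
theorem convert_palette_spec : Claim_equal_convert_palette := by
  intro data _
  unfold Spec_convert_palette
  rw [pvA_eq_map, pvMap_eq_alt]
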